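-- pv_equiv track=rewrite | github.com/fr0gb1t/git-assistant | src/git_assistant/release/ai_evaluator.py | build_unreleased_summary
-- ===== SOURCE A (Python) =====
-- def build_unreleased_summary(unreleased_block: str) -> str:
--     """
--     Build a compact summary of the Unreleased changelog section.
--     """
--     section_names = [
--         "Added",
--         "Fixed",
--         "Changed",
--         "Documentation",
--         "Testing",
--         "Maintenance",
--     ]
--
--     counts: dict[str, int] = {name: 0 for name in section_names}
--     current_section: str | None = None
--
--     for raw_line in unreleased_block.splitlines():
--         line = raw_line.strip()
--
--         if not line:
--             continue
--
--         if line.startswith("### "):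
--             section_name = line[4:].strip()
--             current_section = section_name if section_name in counts else None
--             continue
--
--         if line.startswith("- ") and current_section is not None:
--             counts[current_section] += 1
--
--     total_entries = sum(counts.values())
--
--     lines = [f"- total entries: {total_entries}"]
--     for section_name in section_names:
--         lines.append(f"- {section_name}: {counts[section_name]}")
--
--     return "\n".join(lines)
-- ===== SOURCE B (Python) =====
-- def build_unreleased_summary(unreleased_block: str) -> str:
--     """
--     Build a compact summary of the Unreleased changelog section.
--     """
--     section_names = [
--         "Added",
--         "Fixed",
--         "Changed",
--         "Documentation",
--         "Testing",
--         "Maintenance",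
--     ]
--
--     counts = dict.fromkeys(section_names, 0)
--
--     # Scan the stripped lines BACKWARDS: count bullets into `pending` until the
--     # header that governs them appears; a header claims the pending bullets if
--     # it names a known section and always resets the run.  Bullets left pending
--     # at the end precede every header and are therefore discarded.
--     pending = 0
--     for line in reversed([raw.strip() for raw in unreleased_block.splitlines()]):
--         if line.startswith("### "):
--             name = line[4:].strip()
--             if name in counts:
--                 counts[name] += pending
--             pending = 0
--         elif line.startswith("- "):
--             pending += 1
--
--     total = sum(counts.values())
--     summary_lines = ["- total entries: {}".format(total)]
--     summary_lines += ["- {}: {}".format(name, counts[name]) for name in section_names]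
--     return "\n".join(summary_lines)
-- ===== Notes on version B (the rewrite author's own statement) =====
-- stated objective: alternative
-- what changed: B replaces A's forward scan with a current-section state variable by a single backward scan over the stripped lines that accumulates a pending bullet count and credits it to the governing section header when that header is reached (bullets preceding every header are discarded).
import Mathlib
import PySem

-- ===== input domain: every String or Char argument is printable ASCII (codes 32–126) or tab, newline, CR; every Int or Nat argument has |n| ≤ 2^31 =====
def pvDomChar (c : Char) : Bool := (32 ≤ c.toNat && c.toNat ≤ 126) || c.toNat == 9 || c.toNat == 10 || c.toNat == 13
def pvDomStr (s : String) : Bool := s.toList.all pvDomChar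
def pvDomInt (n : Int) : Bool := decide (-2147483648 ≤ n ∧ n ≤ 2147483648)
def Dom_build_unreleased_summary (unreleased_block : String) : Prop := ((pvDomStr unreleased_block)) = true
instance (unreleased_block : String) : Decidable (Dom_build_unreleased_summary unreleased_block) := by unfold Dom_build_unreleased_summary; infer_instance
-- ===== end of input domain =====

-- B replaces A's forward scan with a current-section state by a backward scan with a pending
-- bullet counter credited at each governing header; same cost, different traversal (objective: alternative).

-- shared constant: the fixed section-name list both Pythons define
def pvSectionNames : List String :=
  ["Added", "Fixed", "Changed", "Documentation", "Testing", "Maintenance"]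

-- ===== PORT A =====
def build_unreleased_summary (unreleased_block : String) : String :=
  -- counts = {name: 0 for name in section_names}; current_section = None
  let counts : PySem.Dict String Int := PySem.Dict.ofList (pvSectionNames.map (fun n => (n, 0)))
  -- for raw_line in unreleased_block.splitlines(): …
  let st := (PySem.Str.splitlines unreleased_block).foldl
    (fun (st : PySem.Dict String Int × Option String) raw_line =>
      let line := PySem.Str.strip raw_line
      if line = "" then st
      else if PySem.Str.startswith line "### " then
        let section_name := PySem.Str.strip (PySem.Str.slice line (some 4) none)
        (st.1, if st.1.contains section_name then some section_name else none)
      else if PySem.Str.startswith line "- " then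
        match st.2 with
        | some cur => (st.1.modify cur 0 (· + 1), st.2)   -- counts[current_section] += 1
        | none => st
      else st)
    (counts, (none : Option String))
  let total := st.1.values.sum
  -- lines = [f"- total entries: {total}"]; for name in section_names: lines.append(…)
  let lines := pvSectionNames.foldl
    (fun acc n => acc ++ ["- " ++ n ++ ": " ++ PySem.Int.toStr (st.1.getD n 0)])
    ["- total entries: " ++ PySem.Int.toStr total]
  PySem.Str.join "\n" lines

-- ===== PORT B =====
def build_unreleased_summary_alt (unreleased_block : String) : String :=
  -- counts = dict.fromkeys(section_names, 0); pending = 0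
  let counts : PySem.Dict String Int := PySem.Dict.ofList (pvSectionNames.map (fun n => (n, 0)))
  -- for line in reversed([raw.strip() for raw in unreleased_block.splitlines()]): …
  let st := ((PySem.Str.splitlines unreleased_block).map PySem.Str.strip).reverse.foldl
    (fun (st : PySem.Dict String Int × Int) line =>
      if PySem.Str.startswith line "### " then
        let name := PySem.Str.strip (PySem.Str.slice line (some 4) none)
        (if st.1.contains name then st.1.modify name 0 (· + st.2) else st.1, 0)
      else if PySem.Str.startswith line "- " then (st.1, st.2 + 1)
      else st)
    (counts, (0 : Int))
  let total := st.1.values.sum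
  PySem.Str.join "\n"
    (("- total entries: " ++ PySem.Int.toStr total) ::
      pvSectionNames.map (fun n => "- " ++ n ++ ": " ++ PySem.Int.toStr (st.1.getD n 0)))

-- ===== PRECONDITION & SPEC =====
def Spec_build_unreleased_summary (unreleased_block : String) (out : String) : Prop := out = build_unreleased_summary_alt unreleased_block
instance (unreleased_block : String) (out : String) : Decidable (Spec_build_unreleased_summary unreleased_block out) := by unfold Spec_build_unreleased_summary; infer_instance

-- ===== CLAIM (what is proved, stated in full; the proofs are below) =====
def Claim_equal_build_unreleased_summary : Prop := ∀ (unreleased_block : String), Dom_build_unreleased_summary unreleased_block → Spec_build_unreleased_summary unreleased_block (build_unreleased_summary unreleased_block)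

-- ===== LEMMAS AND PROOFS =====

-- A's loop body, on an already-stripped line
def pvStepA (st : PySem.Dict String Int × Option String) (line : String) :
    PySem.Dict String Int × Option String :=
  if line = "" then st
  else if PySem.Str.startswith line "### " then
    (st.1, if st.1.contains (PySem.Str.strip (PySem.Str.slice line (some 4) none))
           then some (PySem.Str.strip (PySem.Str.slice line (some 4) none)) else none)
  else if PySem.Str.startswith line "- " then
    match st.2 with
    | some cur => (st.1.modify cur 0 (· + 1), st.2)
    | none => st
  else st

-- B's loop body
def pvStepB (st : PySem.Dict String Int × Int) (line : String) : PySem.Dict String Int × Int :=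
  if PySem.Str.startswith line "### " then
    (if st.1.contains (PySem.Str.strip (PySem.Str.slice line (some 4) none))
     then st.1.modify (PySem.Str.strip (PySem.Str.slice line (some 4) none)) 0 (· + st.2)
     else st.1, 0)
  else if PySem.Str.startswith line "- " then (st.1, st.2 + 1)
  else st

def pvBfold (d : PySem.Dict String Int) (L : List String) : PySem.Dict String Int × Int :=
  L.foldr (fun line st => pvStepB st line) (d, 0)

def pvBump (d : PySem.Dict String Int) (cur : Option String) (p : Int) : PySem.Dict String Int :=
  match cur with
  | some s => d.insert s (d.getD s 0 + p)
  | none => d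

-- dictionary facts used by the loop invariant (our dicts keep a fixed, duplicate-free key list)
lemma pv_contains_eq_keys (d : PySem.Dict String Int) (k : String) :
    d.contains k = d.keys.any (· == k) := by
  simp [PySem.Dict.contains, PySem.Dict.keys, List.any_map, Function.comp_def]

lemma pv_keys_insert (d : PySem.Dict String Int) (k : String) (v : Int)
    (h : d.contains k = true) : (d.insert k v).keys = d.keys := by
  simp only [PySem.Dict.insert, h, if_true, PySem.Dict.keys, List.map_map]
  refine List.map_congr_left (fun p _ => ?_)
  by_cases hp : p.1 = k
  · simp [hp]
  · simp [hp]

lemma pv_dict_ext (d d' : PySem.Dict String Int) (hk : d.keys = d'.keys)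
    (hnd : d.keys.Nodup) (hv : ∀ k, d.getD k 0 = d'.getD k 0) : d = d' := by
  apply PySem.Dict.ext
  rw [PySem.Dict.items_eq_map_keys d hnd 0, PySem.Dict.items_eq_map_keys d' (hk ▸ hnd) 0, ← hk]
  exact List.map_congr_left (fun k _ => by rw [hv k])

lemma pv_insert_self (d : PySem.Dict String Int) (k : String)
    (h : d.contains k = true) (hnd : d.keys.Nodup) : d.insert k (d.getD k 0) = d := by
  refine pv_dict_ext _ _ (pv_keys_insert d k _ h) ?_ (fun j => ?_)
  · rw [pv_keys_insert d k _ h]; exact hnd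
  · by_cases hj : j = k
    · subst hj; rw [PySem.Dict.getD_insert_self]
    · rw [PySem.Dict.getD_insert_of_ne d _ _ hj]

lemma pv_insert_comm (d : PySem.Dict String Int) (k k' : String) (v v' : Int)
    (hk : d.contains k = true) (hk' : d.contains k' = true) (hne : k ≠ k')
    (hnd : d.keys.Nodup) :
    (d.insert k v).insert k' v' = (d.insert k' v').insert k v := by
  have hck' : (d.insert k v).contains k' = true := by
    rw [pv_contains_eq_keys, pv_keys_insert d k v hk, ← pv_contains_eq_keys]; exact hk'
  have hck : (d.insert k' v').contains k = true := by
    rw [pv_contains_eq_keys, pv_keys_insert d k' v' hk', ← pv_contains_eq_keys]; exact hk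
  refine pv_dict_ext _ _ ?_ ?_ (fun j => ?_)
  · rw [pv_keys_insert _ k' v' hck', pv_keys_insert d k v hk,
        pv_keys_insert _ k v hck, pv_keys_insert d k' v' hk']
  · rw [pv_keys_insert _ k' v' hck', pv_keys_insert d k v hk]; exact hnd
  · by_cases hjk : j = k
    · subst hjk
      rw [PySem.Dict.getD_insert_of_ne _ _ _ hne, PySem.Dict.getD_insert_self,
          PySem.Dict.getD_insert_self]
    · by_cases hjk' : j = k'
      · subst hjk'
        rw [PySem.Dict.getD_insert_self, PySem.Dict.getD_insert_of_ne _ _ _ hjk,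
            PySem.Dict.getD_insert_self]
      · simp [PySem.Dict.getD_insert_of_ne _ _ _ hjk, PySem.Dict.getD_insert_of_ne _ _ _ hjk']

-- keys are unchanged by B's backward fold
lemma pv_keys_bfold (L : List String) (d : PySem.Dict String Int) :
    (pvBfold d L).1.keys = d.keys := by
  induction L with
  | nil => rfl
  | cons l L ih =>
    show (pvStepB (pvBfold d L) l).1.keys = d.keys
    unfold pvStepB
    split
    · split
      · rename_i hc
        rw [PySem.Dict.modify, pv_keys_insert _ _ _ hc]; exact ih
      · exact ih
    · split <;> exact ih

lemma pv_contains_congr (d d' : PySem.Dict String Int) (h : d.keys = d'.keys) (k : String) :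
    d.contains k = d'.contains k := by
  rw [pv_contains_eq_keys, h, ← pv_contains_eq_keys]

-- branch-evaluation lemmas for the two loop bodies
lemma pvStepA_empty (st : PySem.Dict String Int × Option String) : pvStepA st "" = st := by
  simp [pvStepA]

lemma pvStepA_header (st : PySem.Dict String Int × Option String) (l : String)
    (hE : l ≠ "") (hH : PySem.Str.startswith l "### " = true) :
    pvStepA st l = (st.1,
      if st.1.contains (PySem.Str.strip (PySem.Str.slice l (some 4) none))
      then some (PySem.Str.strip (PySem.Str.slice l (some 4) none)) else none) := by
  have h := hH; simp at h
  simp [pvStepA, hE, h]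

lemma pvStepA_bullet_some (d : PySem.Dict String Int) (s l : String) (hE : l ≠ "")
    (hH : PySem.Str.startswith l "### " = false)
    (hB : PySem.Str.startswith l "- " = true) :
    pvStepA (d, some s) l = (d.modify s 0 (· + 1), some s) := by
  have h1 := hH; have h2 := hB; simp at h1 h2
  simp [pvStepA, hE, h1, h2]

lemma pvStepA_bullet_none (d : PySem.Dict String Int) (l : String) (hE : l ≠ "")
    (hH : PySem.Str.startswith l "### " = false)
    (hB : PySem.Str.startswith l "- " = true) :
    pvStepA (d, none) l = (d, none) := by
  have h1 := hH; have h2 := hB; simp at h1 h2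
  simp [pvStepA, hE, h1, h2]

lemma pvStepA_other (st : PySem.Dict String Int × Option String) (l : String) (hE : l ≠ "")
    (hH : PySem.Str.startswith l "### " = false)
    (hB : PySem.Str.startswith l "- " = false) :
    pvStepA st l = st := by
  have h1 := hH; have h2 := hB; simp at h1 h2
  simp [pvStepA, hE, h1, h2]

lemma pvStepB_header (st : PySem.Dict String Int × Int) (l : String)
    (hH : PySem.Str.startswith l "### " = true) :
    pvStepB st l = (if st.1.contains (PySem.Str.strip (PySem.Str.slice l (some 4) none))
      then st.1.modify (PySem.Str.strip (PySem.Str.slice l (some 4) none)) 0 (· + st.2)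
      else st.1, 0) := by
  have h := hH; simp at h
  simp [pvStepB, h]

lemma pvStepB_bullet (st : PySem.Dict String Int × Int) (l : String)
    (hH : PySem.Str.startswith l "### " = false)
    (hB : PySem.Str.startswith l "- " = true) :
    pvStepB st l = (st.1, st.2 + 1) := by
  have h1 := hH; have h2 := hB; simp at h1 h2
  simp [pvStepB, h1, h2]

lemma pvStepB_other (st : PySem.Dict String Int × Int) (l : String)
    (hH : PySem.Str.startswith l "### " = false)
    (hB : PySem.Str.startswith l "- " = false) :
    pvStepB st l = st := by
  have h1 := hH; have h2 := hB; simp at h1 h2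
  simp [pvStepB, h1, h2]

lemma pvBfold_cons (d : PySem.Dict String Int) (l : String) (L : List String) :
    pvBfold d (l :: L) = pvStepB (pvBfold d L) l := rfl

-- an initial increment of a present key commutes through B's backward fold
lemma pv_bfold_incr (L : List String) (d : PySem.Dict String Int) (s : String)
    (hs : d.contains s = true) (hnd : d.keys.Nodup) :
    pvBfold (d.insert s (d.getD s 0 + 1)) L =
      ((pvBfold d L).1.insert s ((pvBfold d L).1.getD s 0 + 1), (pvBfold d L).2) := by
  induction L with
  | nil => rfl
  | cons l L ih =>
    rw [pvBfold_cons, pvBfold_cons, ih]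
    rcases hDb : pvBfold d L with ⟨Db, p⟩
    have hkDb : Db.keys = d.keys := by
      have := pv_keys_bfold L d; rw [hDb] at this; exact this
    have hndDb : Db.keys.Nodup := hkDb ▸ hnd
    have hsDb : Db.contains s = true := by
      rw [pv_contains_congr _ d hkDb]; exact hs
    have hkI : (Db.insert s (Db.getD s 0 + 1)).keys = Db.keys := pv_keys_insert _ _ _ hsDb
    cases hH : PySem.Str.startswith l "### " with
    | true =>
      rw [pvStepB_header _ _ hH, pvStepB_header _ _ hH]
      set name := PySem.Str.strip (PySem.Str.slice l (some 4) none) with hname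
      have hcc : (Db.insert s (Db.getD s 0 + 1)).contains name = Db.contains name :=
        pv_contains_congr _ _ hkI name
      by_cases hc : Db.contains name = true
      · simp only [hcc, hc, if_true]
        refine Prod.ext ?_ rfl
        by_cases hns : name = s
        · subst hns
          simp only [PySem.Dict.modify, PySem.Dict.getD_insert_self,
            PySem.Dict.insert_insert_self]
          have : Db.getD name 0 + 1 + p = Db.getD name 0 + p + 1 := by ring
          rw [this]
        · have h1 : (Db.insert s (Db.getD s 0 + 1)).getD name 0 = Db.getD name 0 :=
            PySem.Dict.getD_insert_of_ne _ _ _ hns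
          have h2 : (Db.insert name (Db.getD name 0 + p)).getD s 0 = Db.getD s 0 :=
            PySem.Dict.getD_insert_of_ne _ _ _ (fun h => hns h.symm)
          simp only [PySem.Dict.modify, h1, h2]
          exact pv_insert_comm Db s name _ _ hsDb hc (fun h => hns h.symm) hndDb
      · simp only [hcc, hc, Bool.false_eq_true, if_false]
    | false =>
      cases hB : PySem.Str.startswith l "- " with
      | true => rw [pvStepB_bullet _ _ hH hB, pvStepB_bullet _ _ hH hB]
      | false => rw [pvStepB_other _ _ hH hB, pvStepB_other _ _ hH hB]

-- main invariant: A's forward fold equals B's backward fold plus the pending bump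
set_option maxHeartbeats 1000000 in
lemma pv_main (L : List String) (d : PySem.Dict String Int) (cur : Option String)
    (hnd : d.keys.Nodup) (hcur : ∀ s, cur = some s → d.contains s = true) :
    (L.foldl pvStepA (d, cur)).1 = pvBump (pvBfold d L).1 cur (pvBfold d L).2 := by
  induction L generalizing d cur with
  | nil =>
    simp only [List.foldl_nil, pvBfold, List.foldr_nil]
    cases cur with
    | none => rfl
    | some s =>
      have hs := hcur s rfl
      show d = d.insert s (d.getD s 0 + 0)
      rw [add_zero, pv_insert_self d s hs hnd]
  | cons l L ih =>
    rw [List.foldl_cons, pvBfold_cons]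
    rcases hDb : pvBfold d L with ⟨Db, p⟩
    have hkDb : Db.keys = d.keys := by
      have := pv_keys_bfold L d; rw [hDb] at this; exact this
    have hndDb : Db.keys.Nodup := hkDb ▸ hnd
    by_cases hE : l = ""
    · subst hE
      rw [pvStepA_empty]
      rw [pvStepB_other _ _ (by decide) (by decide)]
      have := ih d cur hnd hcur; rw [hDb] at this; exact this
    · cases hH : PySem.Str.startswith l "### " with
      | true =>
        rw [pvStepA_header _ _ hE hH, pvStepB_header _ _ hH]
        set name := PySem.Str.strip (PySem.Str.slice l (some 4) none) with hname
        have hcDbc : Db.contains name = d.contains name := pv_contains_congr _ d hkDb name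
        by_cases hc : d.contains name = true
        · simp only [hc, if_true]
          have H := ih d (some name) hnd (fun s hs => (Option.some.inj hs) ▸ hc)
          rw [hDb] at H
          rw [H]
          simp only [hcDbc, hc, if_true]
          -- pvBump X cur 0 = X for a valid cur
          have hkM : (Db.modify name 0 (· + p)).keys = Db.keys := by
            rw [PySem.Dict.modify]
            exact pv_keys_insert _ _ _ (by rw [hcDbc]; exact hc)
          cases cur with
          | none => rfl
          | some s =>
            have hs := hcur s rfl
            have hsM : (Db.modify name 0 (· + p)).contains s = true := by
              rw [pv_contains_congr _ _ hkM, pv_contains_congr _ d hkDb]; exact hs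
            simp only [pvBump]
            rw [add_zero, pv_insert_self _ s hsM (hkM ▸ hndDb)]
            rfl
        · simp only [hc, Bool.false_eq_true, if_false]
          have H := ih d none hnd (fun s hs => nomatch hs)
          rw [hDb] at H
          rw [H]
          simp only [hcDbc, hc, Bool.false_eq_true, if_false]
          cases cur with
          | none => rfl
          | some s =>
            have hs := hcur s rfl
            have hsDb : Db.contains s = true := by
              rw [pv_contains_congr _ d hkDb]; exact hs
            simp only [pvBump]
            rw [add_zero, pv_insert_self _ s hsDb hndDb]
      | false =>
        cases hB : PySem.Str.startswith l "- " with
        | true =>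
          rw [pvStepB_bullet _ _ hH hB]
          cases cur with
          | none =>
            rw [pvStepA_bullet_none _ _ hE hH hB]
            have H := ih d none hnd (fun s hs => nomatch hs)
            rw [hDb] at H
            exact H
          | some s =>
            have hs := hcur s rfl
            have hsDb : Db.contains s = true := by
              rw [pv_contains_congr _ d hkDb]; exact hs
            rw [pvStepA_bullet_some _ _ _ hE hH hB]
            simp only [PySem.Dict.modify]
            have hk' : (d.insert s (d.getD s 0 + 1)).keys = d.keys := pv_keys_insert _ _ _ hs
            have hc' : (d.insert s (d.getD s 0 + 1)).contains s = true := by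
              rw [pv_contains_congr _ d hk']; exact hs
            have H := ih (d.insert s (d.getD s 0 + 1)) (some s) (hk' ▸ hnd)
              (fun t ht => (Option.some.inj ht) ▸ hc')
            rw [pv_bfold_incr L d s hs hnd, hDb] at H
            rw [H]
            simp only [pvBump, PySem.Dict.getD_insert_self, PySem.Dict.insert_insert_self]
            have : Db.getD s 0 + 1 + p = Db.getD s 0 + (p + 1) := by ring
            rw [this]
        | false =>
          rw [pvStepA_other _ _ hE hH hB, pvStepB_other _ _ hH hB]
          have H := ih d cur hnd hcur
          rw [hDb] at H
          exact H

-- rendering of the final counts dict (shared shape of both outputs)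
def pvRender (d : PySem.Dict String Int) : String :=
  PySem.Str.join "\n" (("- total entries: " ++ PySem.Int.toStr d.values.sum) ::
    pvSectionNames.map (fun n => "- " ++ n ++ ": " ++ PySem.Int.toStr (d.getD n 0)))

def pvCounts0 : PySem.Dict String Int := PySem.Dict.ofList (pvSectionNames.map (fun n => (n, 0)))

lemma portA_char (u : String) : build_unreleased_summary u =
    pvRender (((PySem.Str.splitlines u).map PySem.Str.strip).foldl pvStepA (pvCounts0, none)).1 := by
  unfold build_unreleased_summary pvRender pvCounts0
  simp only [List.foldl_map, PySem.List.foldl_append_singleton_eq_map, List.singleton_append]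
  rfl

lemma portB_char (u : String) : build_unreleased_summary_alt u =
    pvRender (pvBfold pvCounts0 ((PySem.Str.splitlines u).map PySem.Str.strip)).1 := by
  unfold build_unreleased_summary_alt pvRender pvCounts0 pvBfold
  simp only [List.foldl_reverse]
  rfl

theorem build_unreleased_summary_spec : Claim_equal_build_unreleased_summary := by
  intro u _
  show build_unreleased_summary u = build_unreleased_summary_alt u
  have hnd0 : pvCounts0.keys.Nodup := by decide
  have h := pv_main ((PySem.Str.splitlines u).map PySem.Str.strip) pvCounts0 none hnd0
    (fun s hs => nomatch hs)
  rw [portA_char, portB_char, h]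
  rfl
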